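-- pv_equiv track=rewrite | github.com/rotempasharel1/SlideCraft | frontend/app.py | is_finish_intent
-- ===== SOURCE A (Python) =====
-- def is_finish_intent(text: str) -> bool:
--     t = text.strip().lower()
--
--     finish_phrases = [
--         "the project is done",
--         "project is done",
--         "i'm done",
--         "im done",
--         "we are done",
--         "we're done",
--         "finished",
--         "let's save",
--         "save the project",
--         "save this course",
--         "the course is done",
--         "done with the project",
--         "done with the course",
--     ]
--
--     return any(phrase in t for phrase in finish_phrases)
-- ===== SOURCE B (Python) =====
-- # Finish-phrase check via a first-character dispatch table: one left-to-right
-- # scan of the normalized text; at each position only the phrases starting with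
-- # that character are tested as prefixes.
-- _FIRST = {
--     "t": ["the project is done", "the course is done"],
--     "p": ["project is done"],
--     "i": ["i'm done", "im done"],
--     "w": ["we are done", "we're done"],
--     "f": ["finished"],
--     "l": ["let's save"],
--     "s": ["save the project", "save this course"],
--     "d": ["done with the project", "done with the course"],
-- }
--
--
-- def is_finish_intent(text: str) -> bool:
--     t = text.strip().lower()
--     for i, c in enumerate(t):
--         for p in _FIRST.get(c, ()):
--             if t.startswith(p, i):
--                 return True
--     return False
-- ===== Notes on version B (the rewrite author's own statement) =====
-- stated objective: alternative
-- what changed: Replaces A's thirteen independent substring scans (any(phrase in t)) by a single left-to-right scan of the normalized text with a first-character dispatch table built once, so at each position only the phrases starting with that character are tested as prefixes.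
import Mathlib
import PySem

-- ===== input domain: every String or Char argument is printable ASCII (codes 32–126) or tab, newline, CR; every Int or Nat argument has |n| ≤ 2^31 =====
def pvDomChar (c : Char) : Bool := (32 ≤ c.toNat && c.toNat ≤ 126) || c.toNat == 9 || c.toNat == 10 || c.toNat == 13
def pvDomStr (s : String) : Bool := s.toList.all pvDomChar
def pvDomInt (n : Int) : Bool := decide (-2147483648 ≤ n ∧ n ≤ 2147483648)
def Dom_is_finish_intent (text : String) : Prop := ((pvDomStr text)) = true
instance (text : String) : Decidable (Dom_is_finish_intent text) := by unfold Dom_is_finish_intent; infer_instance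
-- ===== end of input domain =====

-- B replaces A's thirteen independent substring scans by one left-to-right scan of the
-- normalized text with a first-character dispatch table; objective: alternative.

-- ===== PORT A =====
def finishPhrasesA : List String :=
  ["the project is done", "project is done", "i'm done", "im done", "we are done",
   "we're done", "finished", "let's save", "save the project", "save this course",
   "the course is done", "done with the project", "done with the course"]

def is_finish_intent (text : String) : Bool :=
  let t := PySem.Str.lower (PySem.Str.strip text)
  finishPhrasesA.any (fun phrase => PySem.Str.isIn phrase t)

-- ===== PORT B =====
-- the module-level first-character dispatch table _FIRST of Source B
def finishIndexB : PySem.Dict Char (List String) :=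
  PySem.Dict.ofList
    [('t', ["the project is done", "the course is done"]),
     ('p', ["project is done"]),
     ('i', ["i'm done", "im done"]),
     ('w', ["we are done", "we're done"]),
     ('f', ["finished"]),
     ('l', ["let's save"]),
     ('s', ["save the project", "save this course"]),
     ('d', ["done with the project", "done with the course"])]

-- the 'for i, c in enumerate(t)' loop with early return, as structural recursion over
-- the suffixes of t; t.startswith(p, i) is exactly 'p.toList is a prefix of the suffix
-- starting at i' (exact here: 0 ≤ i < len(t))
def scanFinishB : List Char → Bool
  | [] => false
  | c :: rest =>
      (finishIndexB.getD c []).any (fun p => p.toList.isPrefixOf (c :: rest)) ||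
      scanFinishB rest

def is_finish_intent_alt (text : String) : Bool :=
  scanFinishB (PySem.Str.lower (PySem.Str.strip text)).toList

-- ===== PRECONDITION & SPEC =====
def Spec_is_finish_intent (text : String) (out : Bool) : Prop := out = is_finish_intent_alt text
instance (text : String) (out : Bool) : Decidable (Spec_is_finish_intent text out) := by unfold Spec_is_finish_intent; infer_instance

-- ===== CLAIM =====
def Claim_equal_is_finish_intent : Prop := ∀ (text : String), Dom_is_finish_intent text → Spec_is_finish_intent text (is_finish_intent text)

-- ===== LEMMAS AND PROOFS =====

-- every entry of the dispatch table is a phrase of A's list whose first character is its key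
theorem mem_index_sound (c : Char) (p : String)
    (h : p ∈ finishIndexB.getD c []) :
    p ∈ finishPhrasesA ∧ p.toList.head? = some c := by
  rw [show finishIndexB = PySem.Dict.mk
    [('t', ["the project is done", "the course is done"]),
     ('p', ["project is done"]),
     ('i', ["i'm done", "im done"]),
     ('w', ["we are done", "we're done"]),
     ('f', ["finished"]),
     ('l', ["let's save"]),
     ('s', ["save the project", "save this course"]),
     ('d', ["done with the project", "done with the course"])] from rfl] at h
  simp only [PySem.Dict.getD, PySem.Dict.get?_mk_cons] at h
  split_ifs at h with h1 h2 h3 h4 h5 h6 h7 h8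
  · rw [beq_iff_eq] at h1; subst h1; fin_cases h; all_goals exact ⟨by decide, by decide⟩
  · rw [beq_iff_eq] at h2; subst h2; fin_cases h; all_goals exact ⟨by decide, by decide⟩
  · rw [beq_iff_eq] at h3; subst h3; fin_cases h; all_goals exact ⟨by decide, by decide⟩
  · rw [beq_iff_eq] at h4; subst h4; fin_cases h; all_goals exact ⟨by decide, by decide⟩
  · rw [beq_iff_eq] at h5; subst h5; fin_cases h; all_goals exact ⟨by decide, by decide⟩
  · rw [beq_iff_eq] at h6; subst h6; fin_cases h; all_goals exact ⟨by decide, by decide⟩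
  · rw [beq_iff_eq] at h7; subst h7; fin_cases h; all_goals exact ⟨by decide, by decide⟩
  · rw [beq_iff_eq] at h8; subst h8; fin_cases h; all_goals exact ⟨by decide, by decide⟩
  · simp [PySem.Dict.get?] at h

-- every phrase of A's list sits in the dispatch table under its first character
theorem mem_index_complete (p : String) (hp : p ∈ finishPhrasesA) (c : Char)
    (hc : p.toList.head? = some c) :
    p ∈ finishIndexB.getD c [] := by
  fin_cases hp <;> (injection hc with hc2; subst hc2; decide)

-- the scan hits exactly the positions at which some entry of the table is a prefix
theorem scan_iff (cs : List Char) :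
    scanFinishB cs = true ↔
      ∃ i, i < cs.length ∧ ∃ p ∈ finishIndexB.getD (cs.getD i ' ') [],
        p.toList <+: cs.drop i := by
  induction cs with
  | nil => simp [scanFinishB]
  | cons c rest ih =>
    simp only [scanFinishB, Bool.or_eq_true, List.any_eq_true, ih,
      List.isPrefixOf_iff_prefix]
    constructor
    · rintro (⟨p, hp, hpre⟩ | ⟨i, hi, p, hp, hpre⟩)
      · exact ⟨0, by simp, p, by simpa using hp, by simpa using hpre⟩
      · exact ⟨i + 1, by simpa using hi, p, by simpa using hp, by simpa using hpre⟩
    · rintro ⟨i, hi, p, hp, hpre⟩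
      cases i with
      | zero => exact Or.inl ⟨p, by simpa using hp, by simpa using hpre⟩
      | succ j => exact Or.inr ⟨j, by simpa using hi, p, by simpa using hp, by simpa using hpre⟩

theorem phrases_nonempty : ∀ p ∈ finishPhrasesA, p.toList ≠ [] := by decide

-- ===== VERDICT =====
theorem is_finish_intent_spec : Claim_equal_is_finish_intent := by
  intro text _
  unfold Spec_is_finish_intent is_finish_intent is_finish_intent_alt
  set t := PySem.Str.lower (PySem.Str.strip text) with ht
  rw [Bool.eq_iff_iff, scan_iff]
  simp only [List.any_eq_true, PySem.Str.isIn_iff_infix]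
  constructor
  · rintro ⟨p, hp, hinf⟩
    obtain ⟨j, hpre⟩ : ∃ j, p.toList <+: t.toList.drop j :=
      (PySem.Chars.exists_prefix_drop_iff_isIn p.toList t.toList).symm.mp
        ((PySem.Chars.isIn_iff_infix p.toList t.toList).mpr hinf)
    obtain ⟨c, csrest, hc⟩ : ∃ c cs', p.toList = c :: cs' := by
      cases h : p.toList with
      | nil => exact absurd h (phrases_nonempty p hp)
      | cons a l => exact ⟨a, l, rfl⟩
    obtain ⟨s, hs⟩ := hpre
    have hdrop : t.toList.drop j = c :: (csrest ++ s) := by rw [← hs, hc]; simp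
    have hj : j < t.toList.length := by
      by_contra hle
      rw [List.drop_eq_nil_of_le (by omega)] at hdrop; exact absurd hdrop (by simp)
    have hcj : t.toList.getD j ' ' = c := by
      have h2 : t.toList[j]? = some c := by rw [← List.head?_drop, hdrop]; rfl
      rw [List.getD_eq_getElem _ _ hj]
      simpa [List.getElem?_eq_getElem hj] using h2
    refine ⟨j, hj, p, ?_, ⟨s, hs⟩⟩
    rw [hcj]
    exact mem_index_complete p hp c (by rw [hc]; rfl)
  · rintro ⟨i, hi, p, hp, hpre⟩
    obtain ⟨hpA, _⟩ := mem_index_sound _ p hp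
    exact ⟨p, hpA, hpre.isInfix.trans (List.drop_suffix i t.toList).isInfix⟩
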